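-- pv_equiv track=rewrite | github.com/ToxikSkrrt/COURS | Fac/L1/Premier Semestre/Info/DS/tp note/TP3.py | sommeTabRec
-- ===== SOURCE A (Python) =====
-- def sommeTabRec(tab, i, n):
--     if n - 1 == i and tab[n - 1] >= 0:
--         return tab[i]
--     elif n - 1 == i and tab[n - 1] < 0:
--         return 0
--     if tab[n - 1] >= 0:
--         return tab[n - 1] + sommeTabRec(tab, i, n - 1)
--     else:
--         return sommeTabRec(tab, i, n - 1)
-- ===== SOURCE B (Python) =====
-- def sommeTabRec(tab, i, n):
--     s = 0
--     k = n - 1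
--     while k != i:
--         if tab[k] >= 0:
--             s += tab[k]
--         k -= 1
--     if tab[i] >= 0:
--         s += tab[i]
--     return s
-- ===== Notes on version B (the rewrite author's own statement) =====
-- stated objective: simpler
-- what changed: Replaces the slice-shrinking self-recursion with an explicit accumulator while-loop running k from n-1 down to i, eliminating recursion (constant space, no call stack).
import Mathlib
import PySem

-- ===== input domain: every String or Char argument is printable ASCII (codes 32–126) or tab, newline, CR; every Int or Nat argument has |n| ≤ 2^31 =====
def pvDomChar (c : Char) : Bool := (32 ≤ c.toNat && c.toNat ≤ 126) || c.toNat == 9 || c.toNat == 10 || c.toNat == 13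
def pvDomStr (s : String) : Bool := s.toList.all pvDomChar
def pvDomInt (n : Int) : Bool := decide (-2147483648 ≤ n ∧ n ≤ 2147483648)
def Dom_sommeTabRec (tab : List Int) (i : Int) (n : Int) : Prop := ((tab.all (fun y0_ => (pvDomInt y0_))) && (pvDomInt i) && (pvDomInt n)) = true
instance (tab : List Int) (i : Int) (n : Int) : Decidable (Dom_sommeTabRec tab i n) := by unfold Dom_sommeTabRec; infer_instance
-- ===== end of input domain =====

-- B replaces A's downward self-recursion by an explicit accumulator while-loop (k from n-1 down
-- to i); same O(n-i) cost, no recursion.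

-- ===== PORT A =====
-- A's recursion shrinks n by 1 each call until n-1 == i; fuel (n-i).toNat bounds that depth
-- (fuel 0 is reached only outside Pre_, where the Python raises).
def sommeTabRecGo (tab : List Int) (i : Int) : Nat → Int → Int
  | 0, _ => 0
  | fuel+1, n =>
      match PySem.List.pyGet? tab (n - 1) with
      | none => 0        -- IndexError in Python; outside Pre_
      | some v =>
        if n - 1 = i then
          (if v ≥ 0 then (PySem.List.pyGet? tab i).getD 0 else 0)
        else
          (if v ≥ 0 then v + sommeTabRecGo tab i fuel (n - 1)
           else sommeTabRecGo tab i fuel (n - 1))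

def sommeTabRec (tab : List Int) (i : Int) (n : Int) : Int :=
  sommeTabRecGo tab i (n - i).toNat n

-- ===== PORT B =====
-- Source B's 'while k != i' loop, carrying the accumulator s; fuel (n-1-i).toNat bounds the
-- iteration count (fuel 0 / index out of range happen only outside Pre_, where the Python raises).
def sommeTabRecAltGo (tab : List Int) (i : Int) : Nat → Int → Int → Int
  | 0, _, s => s
  | fuel+1, k, s =>
      if k = i then s
      else
        match PySem.List.pyGet? tab k with
        | none => s      -- IndexError in Python; outside Pre_
        | some v => sommeTabRecAltGo tab i fuel (k - 1) (if v ≥ 0 then s + v else s)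

def sommeTabRec_alt (tab : List Int) (i : Int) (n : Int) : Int :=
  let s := sommeTabRecAltGo tab i (n - 1 - i).toNat (n - 1) 0
  match PySem.List.pyGet? tab i with
  | none => s            -- IndexError in Python; outside Pre_
  | some v => if v ≥ 0 then s + v else s

-- ===== PRECONDITION & SPEC =====
-- Pre_ is exactly where A returns: i < n and every accessed index n-1, …, i is in Python's
-- range [-len, len); otherwise A raises IndexError (or RecursionError when i ≥ n).
def Pre_sommeTabRec (tab : List Int) (i : Int) (n : Int) : Prop :=
  -(tab.length : Int) ≤ i ∧ i < n ∧ n ≤ (tab.length : Int)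
instance (tab : List Int) (i : Int) (n : Int) : Decidable (Pre_sommeTabRec tab i n) := by
  unfold Pre_sommeTabRec; infer_instance

def pvWitness_sommeTabRec : List Int × Int × Int := ([3, -1, 4, -2], 1, 4)

def Spec_sommeTabRec (tab : List Int) (i : Int) (n : Int) (out : Int) : Prop :=
  out = sommeTabRec_alt tab i n
instance (tab : List Int) (i : Int) (n : Int) (out : Int) : Decidable (Spec_sommeTabRec tab i n out) := by
  unfold Spec_sommeTabRec; infer_instance

-- ===== CLAIM (what is proved, stated in full; the proofs are below) =====
def Claim_equal_sommeTabRec : Prop := ∀ (tab : List Int) (i : Int) (n : Int), Dom_sommeTabRec tab i n → Pre_sommeTabRec tab i n → Spec_sommeTabRec tab i n (sommeTabRec tab i n)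

-- ===== LEMMAS AND PROOFS =====

-- the contribution of index k (0 if negative or out of range)
def pvPos (tab : List Int) (k : Int) : Int :=
  match PySem.List.pyGet? tab k with
  | none => 0
  | some v => if v ≥ 0 then v else 0

theorem pvGet_some (tab : List Int) (k : Int) (h1 : -(tab.length : Int) ≤ k)
    (h2 : k < (tab.length : Int)) : ∃ v, PySem.List.pyGet? tab k = some v := by
  have hne : PySem.List.pyGet? tab k ≠ none := by
    rw [Ne, PySem.List.pyGet?_eq_none_iff]
    simp only [PySem.Raise.InRange, not_and, not_lt]
    omega
  exact Option.ne_none_iff_exists'.mp hne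

-- A's fueled recursion equals the sum of the contributions of i, …, n-1.
theorem sommeTabRecGo_eq (tab : List Int) (i : Int) :
    ∀ (fuel : Nat) (n : Int), -(tab.length : Int) ≤ i → i < n → n ≤ (tab.length : Int) →
      (n - i).toNat ≤ fuel →
      sommeTabRecGo tab i fuel n = ((PySem.List.pyRange i n 1).map (pvPos tab)).sum := by
  intro fuel
  induction fuel with
  | zero => intro n h0 h1 h2 hf; omega
  | succ fuel ih =>
    intro n h0 h1 h2 hf
    obtain ⟨v, hidx⟩ := pvGet_some tab (n - 1) (by omega) (by omega)
    by_cases hbase : n - 1 = i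
    · have hn : n = i + 1 := by omega
      subst hn
      simp only [sommeTabRecGo, hidx]
      rw [PySem.List.pyRange_one_singleton]
      have hi : PySem.List.pyGet? tab i = some v := by simpa using hidx
      have hpos : pvPos tab i = if v ≥ 0 then v else 0 := by simp [pvPos, hi]
      simp only [List.map_cons, List.map_nil, List.sum_cons, List.sum_nil, hpos, hi,
        Option.getD_some, add_zero]
      simp [hbase]
    · have hsplit : PySem.List.pyRange i n 1
          = PySem.List.pyRange i (n - 1) 1 ++ [n - 1] := by
        have := PySem.List.pyRange_one_succ_right (a := i) (b := n - 1) (by omega)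
        simpa using this
      rw [hsplit]
      simp only [sommeTabRecGo, hidx, if_neg hbase, List.map_append, List.sum_append,
        List.map_cons, List.map_nil, List.sum_cons, List.sum_nil]
      rw [ih (n - 1) h0 (by omega) (by omega) (by omega)]
      have hpos : pvPos tab (n - 1) = if v ≥ 0 then v else 0 := by simp [pvPos, hidx]
      rw [hpos]
      split_ifs with hv
      · ring
      · ring
-- B's loop: the accumulator factors out …
theorem sommeTabRecAltGo_acc (tab : List Int) (i : Int) :
    ∀ (fuel : Nat) (k s : Int),
      sommeTabRecAltGo tab i fuel k s = s + sommeTabRecAltGo tab i fuel k 0 := by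
  intro fuel
  induction fuel with
  | zero => intro k s; simp [sommeTabRecAltGo]
  | succ fuel ih =>
    intro k s
    simp only [sommeTabRecAltGo]
    by_cases hk : k = i
    · simp [hk]
    · simp only [if_neg hk]
      cases hg : PySem.List.pyGet? tab k with
      | none => simp
      | some v =>
        dsimp only
        rw [ih (k - 1) (if v ≥ 0 then s + v else s), ih (k - 1) (if v ≥ 0 then 0 + v else 0)]
        split_ifs with hv <;> ring

-- … and, started at 0 from k, it sums the contributions of i+1, …, k.
theorem sommeTabRecAltGo_eq (tab : List Int) (i : Int) :
    ∀ (fuel : Nat) (k : Int), -(tab.length : Int) ≤ i → i ≤ k → k < (tab.length : Int) →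
      (k - i).toNat ≤ fuel →
      sommeTabRecAltGo tab i fuel k 0
        = ((PySem.List.pyRange (i + 1) (k + 1) 1).map (pvPos tab)).sum := by
  intro fuel
  induction fuel with
  | zero =>
    intro k h0 h1 h2 hf
    have hk : k = i := by omega
    subst hk
    rw [PySem.List.pyRange_one_eq_nil (by omega)]
    simp [sommeTabRecAltGo]
  | succ fuel ih =>
    intro k h0 h1 h2 hf
    by_cases hk : k = i
    · subst hk
      rw [PySem.List.pyRange_one_eq_nil (by omega)]
      simp [sommeTabRecAltGo]
    · obtain ⟨v, hidx⟩ := pvGet_some tab k (by omega) (by omega)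
      have hsplit : PySem.List.pyRange (i + 1) (k + 1) 1
          = PySem.List.pyRange (i + 1) k 1 ++ [k] := by
        have := PySem.List.pyRange_one_succ_right (a := i + 1) (b := k) (by omega)
        simpa using this
      rw [hsplit]
      simp only [sommeTabRecAltGo, if_neg hk, hidx, List.map_append, List.sum_append,
        List.map_cons, List.map_nil, List.sum_cons, List.sum_nil]
      rw [sommeTabRecAltGo_acc, ih (k - 1) h0 (by omega) (by omega) (by omega)]
      have heq : PySem.List.pyRange (i + 1) (k - 1 + 1) 1 = PySem.List.pyRange (i + 1) k 1 := by
        norm_num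
      rw [heq]
      have hpos : pvPos tab k = if v ≥ 0 then v else 0 := by simp [pvPos, hidx]
      rw [hpos]
      split_ifs with hv <;> ring

-- ===== VERDICT (by name: the statement is the Claim_ definition above) =====
theorem sommeTabRec_spec : Claim_equal_sommeTabRec := by
  intro tab i n _ hpre
  obtain ⟨h0, h1, h2⟩ := hpre
  obtain ⟨w, hi⟩ := pvGet_some tab i (by omega) (by omega)
  unfold Spec_sommeTabRec sommeTabRec sommeTabRec_alt
  rw [sommeTabRecGo_eq tab i _ n h0 h1 h2 le_rfl]
  simp only [hi]
  rw [sommeTabRecAltGo_eq tab i _ (n - 1) h0 (by omega) (by omega) (by omega)]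
  have heq : PySem.List.pyRange (i + 1) (n - 1 + 1) 1 = PySem.List.pyRange (i + 1) n 1 := by
    norm_num
  rw [heq, PySem.List.pyRange_one_cons h1]
  simp only [List.map_cons, List.sum_cons]
  have hpos : pvPos tab i = if w ≥ 0 then w else 0 := by simp [pvPos, hi]
  rw [hpos]
  split_ifs with hv <;> ring
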